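-- pv_equiv track=rewrite | github.com/tianboarenjie/algorithm | string/substr.py | remove_k_zero
-- ===== SOURCE A (Python) =====
-- def remove_k_zero(str1, k):
--     """
--     删除str1中连续的k个'0'
--     :type str1:str
--     :type k:int
--     :param str1:
--     :return:
--     """
--     if not str1 or k < 1:
--         return str1
--     chas = list(str1)
--     count = 0
--     start = -1
--     for i in range(len(chas)):
--         if chas[i] == "0":
--             count += 1
--             start = i if start == -1 else start
--         else:
--             if count == k:
--                 while count:
--                     chas[start] = ""
--                     start += 1
--                     count -= 1
--             count = 0
--             start = -1
--     if count == k: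
--         while count:
--             chas[start] = ""
--             start += 1
--             count -= 1
--     return "".join(chas)
-- ===== SOURCE B (Python) =====
-- def remove_k_zero(str1, k):
--     """Run-based rewrite: split str1 into maximal runs of equal characters in one
--     pass and drop exactly the '0'-runs whose length equals k; no in-place blanking."""
--     if not str1 or k < 1:
--         return str1
--     out = []
--     n = len(str1)
--     i = 0
--     while i < n:
--         j = i + 1
--         while j < n and str1[j] == str1[i]:
--             j += 1
--         if not (str1[i] == '0' and j - i == k):
--             out.append(str1[i:j])
--         i = j
--     return ''.join(out)
-- ===== Notes on version B (the rewrite author's own statement) =====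
-- stated objective: alternative
-- what changed: Replaces A's index scan with count/start state and in-place blanking of list cells with a single run-splitting pass: maximal runs of equal characters are located with two indices and every run is kept except '0'-runs of length exactly k, joined at the end.
import Mathlib
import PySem

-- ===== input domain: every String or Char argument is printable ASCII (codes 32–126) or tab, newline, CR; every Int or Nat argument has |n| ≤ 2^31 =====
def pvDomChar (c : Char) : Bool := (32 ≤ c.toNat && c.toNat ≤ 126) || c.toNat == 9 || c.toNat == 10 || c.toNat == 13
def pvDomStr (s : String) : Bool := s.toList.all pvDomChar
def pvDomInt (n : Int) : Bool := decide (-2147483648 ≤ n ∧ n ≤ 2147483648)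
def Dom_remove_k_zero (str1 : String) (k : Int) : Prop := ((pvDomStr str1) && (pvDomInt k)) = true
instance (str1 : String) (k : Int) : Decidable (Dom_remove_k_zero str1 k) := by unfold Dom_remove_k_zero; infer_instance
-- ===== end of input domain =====

-- B differs from A by decomposition: A scans indices keeping (count, start) state and blanks
-- list cells in place; B splits the string into maximal runs and drops '0'-runs of length k.

-- ===== PORT A =====
-- the inner `while count: chas[start] = ""; start += 1; count -= 1` loop; exact for
-- 0 <= start and 0 <= count, the only states A's scan reaches (count zeros begin at chas[start])
def pvBlankAux : List String → Int → Nat → List String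
  | chas, _, 0 => chas
  | chas, start, Nat.succ n => pvBlankAux (chas.set start.toNat "") (start + 1) n

def pvBlank (chas : List String) (start count : Int) : List String :=
  pvBlankAux chas start count.toNat

-- one iteration of A's `for i in range(len(chas))` body, on state (chas, count, start)
def pvStepA (k : Int) (s : List String × Int × Int) (i : Int) : List String × Int × Int :=
  if (PySem.List.pyGet? s.1 i).getD "" = "0" then
    (s.1, s.2.1 + 1, if s.2.2 = -1 then i else s.2.2)
  else if s.2.1 = k then (pvBlank s.1 s.2.2 s.2.1, 0, -1)
  else (s.1, 0, -1)

def remove_k_zero (str1 : String) (k : Int) : String :=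
  if str1 = "" ∨ k < 1 then str1 else
  let chas := str1.toList.map (fun c => String.ofList [c])
  let res := (PySem.List.pyRange 0 (chas.length : Int) 1).foldl (pvStepA k) (chas, 0, -1)
  let chas2 := if res.2.1 = k then pvBlank res.1 res.2.2 res.2.1 else res.1
  PySem.Str.join "" chas2

-- ===== PORT B =====
-- B's outer while loop advances run by run: the remaining suffix str1[i:] is the recursion
-- argument; the inner `while j < n and str1[j] == str1[i]` scan is the takeWhile, i = j the dropWhile
def pvRunsB (k : Int) : List Char → List String
  | [] => []
  | c :: cs =>
      let run := c :: cs.takeWhile (· = c)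
      let rest := pvRunsB k (cs.dropWhile (· = c))
      if c = '0' ∧ (run.length : Int) = k then rest
      else String.ofList run :: rest
termination_by cs => cs.length
decreasing_by simpa using Nat.lt_succ_of_le (List.length_dropWhile_le _ _)

def remove_k_zero_alt (str1 : String) (k : Int) : String :=
  if str1 = "" ∨ k < 1 then str1 else
  PySem.Str.join "" (pvRunsB k str1.toList)

-- ===== PRECONDITION & SPEC =====
def Spec_remove_k_zero (str1 : String) (k : Int) (out : String) : Prop := out = remove_k_zero_alt str1 k
instance (str1 : String) (k : Int) (out : String) : Decidable (Spec_remove_k_zero str1 k out) := by unfold Spec_remove_k_zero; infer_instance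

-- ===== CLAIM (what is proved, stated in full; the proofs are below) =====
def Claim_equal_remove_k_zero : Prop := ∀ (str1 : String) (k : Int), Dom_remove_k_zero str1 k → Spec_remove_k_zero str1 k (remove_k_zero str1 k)

-- ===== LEMMAS AND PROOFS =====

-- abstract description of A's scan: out0 = finished cells, cnt = length of the pending '0'-run
def pvLoopC (k : Int) (out0 : List String) (cnt : Nat) : List Char → List String
  | [] => if (cnt : Int) = k then out0 ++ List.replicate cnt "" else out0 ++ List.replicate cnt "0"
  | c :: rs => if c = '0' then pvLoopC k out0 (cnt + 1) rs
      else pvLoopC k ((if (cnt : Int) = k then out0 ++ List.replicate cnt "" else out0 ++ List.replicate cnt "0") ++ [String.ofList [c]]) 0 rs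

theorem pvSing_eq_zero_iff (c : Char) : (String.ofList [c] = "0") ↔ c = '0' := by
  constructor
  · intro h; have := congrArg String.toList h; simpa using this
  · rintro rfl; rfl

theorem pvBlank_spec (xs : List String) : ∀ (pre rest : List String),
    pvBlankAux (pre ++ xs ++ rest) (pre.length : Int) xs.length
      = pre ++ List.replicate xs.length "" ++ rest := by
  induction xs with
  | nil => intro pre rest; simp [pvBlankAux]
  | cons y ys ih =>
    intro pre rest
    simp only [List.length_cons, pvBlankAux]
    have hset : (pre ++ (y :: ys) ++ rest).set ((pre.length : Int)).toNat ""
        = (pre ++ [""]) ++ (ys ++ rest) := by simp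
    have hlen : ((pre.length : Int)) + 1 = (((pre ++ [""]).length : Nat) : Int) := by simp
    rw [hset, hlen]
    have h2 := ih (pre ++ [""]) rest
    rw [← List.append_assoc]
    rw [h2]
    simp [List.replicate_succ]

-- A's fold, started in any reachable state, computes pvLoopC
theorem pvLoop_spec (k : Int) (hk : 1 ≤ k) :
    ∀ (rs : List Char) (out0 : List String) (cnt : Nat),
    (let out := out0 ++ List.replicate cnt "0"
     let res := (PySem.List.pyRange (out.length : Int) ((out.length + rs.length : Nat) : Int) 1).foldl
        (pvStepA k)
        (out ++ rs.map (fun c => String.ofList [c]), (cnt : Int), if cnt = 0 then -1 else (out0.length : Int))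
     (if res.2.1 = k then pvBlank res.1 res.2.2 res.2.1 else res.1) = pvLoopC k out0 cnt rs) := by
  intro rs
  induction rs with
  | nil =>
    intro out0 cnt
    simp only [List.length_nil, Nat.add_zero, List.map_nil, List.append_nil]
    rw [PySem.List.pyRange_one_eq_nil le_rfl]
    simp only [List.foldl_nil, pvLoopC]
    by_cases hc : (cnt : Int) = k
    · have hcnt : 0 < cnt := by omega
      rw [if_pos hc, if_pos hc]
      have hst : (if cnt = 0 then (-1 : Int) else (out0.length : Int)) = (out0.length : Int) := by
        simp [Nat.pos_iff_ne_zero.mp hcnt]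
      rw [hst]
      show pvBlank (out0 ++ List.replicate cnt "0") (out0.length : Int) (cnt : Int) = _
      unfold pvBlank
      rw [Int.toNat_natCast]
      have := pvBlank_spec (List.replicate cnt "0") out0 []
      simpa using this
    · rw [if_neg hc, if_neg hc]
  | cons c rs ih =>
    intro out0 cnt
    simp only
    set out := out0 ++ List.replicate cnt "0" with hout
    have hlt : (out.length : Int) < ((out.length + (c :: rs).length : Nat) : Int) := by
      simp [List.length_cons]
    rw [PySem.List.pyRange_one_cons hlt]
    simp only [List.foldl_cons]
    have hget : (PySem.List.pyGet? (out ++ (c :: rs).map (fun c => String.ofList [c])) (out.length : Int)).getD ""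
        = String.ofList [c] := by
      simp only [List.map_cons]
      rw [PySem.List.pyGet?_append_length]
      rfl
    by_cases hc : c = '0'
    · -- zero branch
      subst hc
      have hz : (String.ofList ['0'] : String) = "0" := rfl
      have hstep : pvStepA k (out ++ ('0' :: rs).map (fun c => String.ofList [c]), (cnt : Int),
            if cnt = 0 then -1 else (out0.length : Int)) (out.length : Int)
          = (out0 ++ List.replicate (cnt+1) "0" ++ rs.map (fun c => String.ofList [c]), ((cnt+1 : Nat) : Int),
            if cnt + 1 = 0 then -1 else (out0.length : Int)) := by
        unfold pvStepA
        simp only [hget, hz, if_true]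
        refine Prod.ext ?_ (Prod.ext ?_ ?_)
        · show out ++ ('0' :: rs).map (fun c => String.ofList [c]) = _
          rw [hout]
          simp [List.replicate_succ', List.append_assoc]
        · push_cast; rfl
        · show (if (if cnt = 0 then (-1:Int) else (out0.length : Int)) = -1 then (out.length : Int) else if cnt = 0 then -1 else (out0.length : Int)) = _
          by_cases hcz : cnt = 0
          · simp [hcz, hout]
          · have : ((out0.length : Int)) ≠ -1 := by omega
            simp [hcz, this]
      rw [hstep]
      have harg1 : (out.length : Int) + 1 = (((out0 ++ List.replicate (cnt+1) "0").length : Nat) : Int) := by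
        simp [hout, List.length_append, List.length_replicate]; ring
      have harg2 : ((out.length + ('0' :: rs).length : Nat) : Int)
          = (((out0 ++ List.replicate (cnt+1) "0").length + rs.length : Nat) : Int) := by
        simp [hout, List.length_append, List.length_replicate, List.length_cons]; ring
      rw [harg1, harg2]
      have := ih out0 (cnt + 1)
      simp only at this
      rw [this]
      rw [pvLoopC]
      simp
    · -- non-zero branch
      have hnz : String.ofList [c] ≠ "0" := by
        intro h; exact hc ((pvSing_eq_zero_iff c).mp h)
      set out0' := (if (cnt : Int) = k then out0 ++ List.replicate cnt "" else out0 ++ List.replicate cnt "0") ++ [String.ofList [c]] with hout0'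
      have hstep : pvStepA k (out ++ (c :: rs).map (fun c => String.ofList [c]), (cnt : Int),
            if cnt = 0 then -1 else (out0.length : Int)) (out.length : Int)
          = (out0' ++ rs.map (fun c => String.ofList [c]), ((0:Nat) : Int),
            if (0:Nat) = 0 then -1 else ((out0'.length : Nat) : Int)) := by
        unfold pvStepA
        rw [hget]
        rw [if_neg hnz]
        by_cases hck : (cnt : Int) = k
        · rw [if_pos hck]
          have hcnt : 0 < cnt := by omega
          refine Prod.ext ?_ (Prod.ext rfl rfl)
          show pvBlank (out ++ (c :: rs).map (fun c => String.ofList [c])) (if cnt = 0 then (-1:Int) else (out0.length:Int)) (cnt : Int) = _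
          rw [if_neg (Nat.pos_iff_ne_zero.mp hcnt)]
          unfold pvBlank
          rw [Int.toNat_natCast]
          have hb := pvBlank_spec (List.replicate cnt "0") out0 ((c :: rs).map (fun c => String.ofList [c]))
          rw [List.length_replicate] at hb
          rw [List.append_assoc] at hb
          rw [hout, List.append_assoc, hb, hout0', if_pos hck]
          simp [List.append_assoc]
        · rw [if_neg hck]
          refine Prod.ext ?_ (Prod.ext rfl rfl)
          show out ++ (c :: rs).map (fun c => String.ofList [c]) = _
          rw [hout0', if_neg hck, hout]
          simp [List.append_assoc]
      rw [hstep]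
      have harg1 : (out.length : Int) + 1 = ((out0'.length : Nat) : Int) := by
        rw [hout0', hout]
        by_cases hck : (cnt : Int) = k <;> simp [hck, List.length_append, List.length_replicate] <;> ring
      have harg2 : ((out.length + (c :: rs).length : Nat) : Int) = ((out0'.length + rs.length : Nat) : Int) := by
        rw [hout0', hout]
        by_cases hck : (cnt : Int) = k <;> simp [hck, List.length_append, List.length_replicate, List.length_cons] <;> ring
      have hini : out0' ++ rs.map (fun c => String.ofList [c]) = (out0' ++ List.replicate 0 "0") ++ rs.map (fun c => String.ofList [c]) := by simp
      rw [harg1, harg2, hini]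
      have := ih out0' 0
      simp only [List.append_nil, List.replicate_zero] at this ⊢
      rw [this]
      rw [pvLoopC]
      rw [if_neg hc]

theorem pvRunsB_cons (k : Int) (c : Char) (cs : List Char) :
    pvRunsB k (c :: cs)
      = if c = '0' ∧ (((c :: cs.takeWhile (· = c)).length : Nat) : Int) = k
        then pvRunsB k (cs.dropWhile (· = c))
        else String.ofList (c :: cs.takeWhile (· = c)) :: pvRunsB k (cs.dropWhile (· = c)) := by
  rw [pvRunsB]

def pvFlat (l : List String) : List Char := (l.map String.toList).flatten

theorem pvFlat_append (a b : List String) : pvFlat (a ++ b) = pvFlat a ++ pvFlat b := by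
  simp [pvFlat]

theorem pvFlat_repl_empty (n : Nat) : pvFlat (List.replicate n "") = [] := by
  induction n with
  | zero => rfl
  | succ m ih => simp only [List.replicate_succ, pvFlat, List.map_cons, List.flatten_cons] at ih ⊢; simp [ih]

theorem pvFlat_repl_zero (n : Nat) : pvFlat (List.replicate n "0") = List.replicate n '0' := by
  induction n with
  | zero => rfl
  | succ m ih => simp only [List.replicate_succ, pvFlat, List.map_cons, List.flatten_cons] at ih ⊢; simp [ih]

theorem pvTake_repl (n : Nat) (l : List Char) :
    (List.replicate n '0' ++ l).takeWhile (· = '0') = List.replicate n '0' ++ l.takeWhile (· = '0') := by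
  induction n with
  | zero => simp
  | succ m ih => simp [List.replicate_succ, ih]

theorem pvDrop_repl (n : Nat) (l : List Char) :
    (List.replicate n '0' ++ l).dropWhile (· = '0') = l.dropWhile (· = '0') := by
  induction n with
  | zero => simp
  | succ m ih => simp [List.replicate_succ, ih]

theorem pvTake_ne (c : Char) (hc : c ≠ '0') (l : List Char) :
    (c :: l).takeWhile (· = '0') = [] := by
  simp [List.takeWhile_cons, hc]

-- flattened output of B on a suffix starting with a non-'0' character
theorem pvRunsB_flat_cons (k : Int) (c : Char) (hc : c ≠ '0') (cs : List Char) :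
    pvFlat (pvRunsB k (c :: cs)) = c :: pvFlat (pvRunsB k cs) := by
  rw [pvRunsB]
  simp only [hc, false_and, if_false]
  cases cs with
  | nil => simp [pvRunsB, pvFlat]
  | cons d ds =>
    by_cases hdc : d = c
    · subst hdc
      rw [pvRunsB]
      simp only [hc, false_and, if_false]
      simp [pvFlat, List.takeWhile_cons]
    · have h1 : (d :: ds).takeWhile (· = c) = [] := by simp [List.takeWhile_cons, hdc]
      have h2 : (d :: ds).dropWhile (· = c) = d :: ds := by simp [List.dropWhile_cons, hdc]
      rw [h1, h2]
      simp [pvFlat]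

-- flattened, A's abstract scan agrees with B's kept runs
theorem pvRuns_flat (k : Int) (hk : 1 ≤ k) :
    ∀ (cs : List Char) (cnt : Nat) (out0 : List String),
    pvFlat (pvLoopC k out0 cnt cs)
      = pvFlat out0 ++ pvFlat (pvRunsB k (List.replicate cnt '0' ++ cs)) := by
  intro cs
  induction cs with
  | nil =>
    intro cnt out0
    rw [pvLoopC]
    by_cases hck : (cnt : Int) = k
    · have hcnt : 0 < cnt := by omega
      rw [if_pos hck]
      obtain ⟨m, rfl⟩ : ∃ m, cnt = m + 1 := ⟨cnt - 1, by omega⟩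
      rw [List.append_nil, List.replicate_succ]
      have ht : (List.replicate m '0').takeWhile (· = '0') = List.replicate m '0' := by
        simpa using pvTake_repl m []
      have hd : (List.replicate m '0').dropWhile (· = '0') = [] := by
        simpa using pvDrop_repl m []
      rw [show List.replicate (m+1) '0' = '0' :: List.replicate m '0' from List.replicate_succ ..]
      rw [pvRunsB_cons, ht, hd]
      have hlen : (( ('0' :: List.replicate m '0').length : Nat) : Int) = ((m+1 : Nat):Int) := by simp
      rw [if_pos ⟨rfl, by rw [hlen]; exact_mod_cast hck⟩]
      simp [pvFlat_append, pvFlat_repl_empty, pvRunsB, pvFlat]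
    · rw [if_neg hck]
      cases cnt with
      | zero => simp [pvFlat_append, pvRunsB, pvFlat]
      | succ m =>
        rw [List.append_nil, List.replicate_succ]
        have ht : (List.replicate m '0').takeWhile (· = '0') = List.replicate m '0' := by
          simpa using pvTake_repl m []
        have hd : (List.replicate m '0').dropWhile (· = '0') = [] := by
          simpa using pvDrop_repl m []
        rw [show List.replicate (m+1) '0' = '0' :: List.replicate m '0' from List.replicate_succ ..]
        rw [pvRunsB_cons, ht, hd]
        have hiff : ¬ ('0' = '0' ∧ (( ('0' :: List.replicate m '0').length : Nat) : Int) = k) := by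
          rintro ⟨-, h⟩; apply hck; simpa using h
        rw [if_neg hiff]
        simp [pvFlat_append, pvFlat_repl_zero, pvRunsB, pvFlat, List.replicate_succ]
  | cons c cs ih =>
    intro cnt out0
    rw [pvLoopC]
    by_cases hc : c = '0'
    · subst hc
      rw [if_pos rfl, ih (cnt+1) out0]
      have : List.replicate cnt '0' ++ '0' :: cs = List.replicate (cnt+1) '0' ++ cs := by
        simp [List.replicate_succ', List.append_assoc]
      rw [this]
    · rw [if_neg hc, ih 0 _]
      simp only [List.replicate_zero, List.nil_append]
      cases cnt with
      | zero =>
        simp only [List.replicate_zero, List.nil_append]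
        rw [pvRunsB_flat_cons k c hc cs]
        by_cases hck : ((0:Nat) : Int) = k
        · omega
        · rw [if_neg hck]
          simp [pvFlat_append, pvFlat]
      | succ m =>
        rw [List.replicate_succ]
        have ht : (List.replicate m '0' ++ c :: cs).takeWhile (· = '0') = List.replicate m '0' := by
          rw [pvTake_repl, pvTake_ne c hc]; simp
        have hd : (List.replicate m '0' ++ c :: cs).dropWhile (· = '0') = c :: cs := by
          rw [pvDrop_repl]; simp [List.dropWhile_cons, hc]
        rw [show List.replicate (m+1) '0' = '0' :: List.replicate m '0' from List.replicate_succ ..]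
        rw [List.cons_append, pvRunsB_cons k '0' (List.replicate m '0' ++ c :: cs), ht, hd]
        by_cases hck : ((m+1 : Nat) : Int) = k
        · rw [if_pos hck]
          have : ('0' = '0' ∧ ((('0' :: List.replicate m '0').length : Nat) : Int) = k) := ⟨rfl, by simpa using hck⟩
          rw [if_pos this]
          rw [pvRunsB_flat_cons k c hc cs]
          simp [pvFlat_append, pvFlat_repl_empty, pvFlat]
        · rw [if_neg hck]
          have : ¬ ('0' = '0' ∧ ((('0' :: List.replicate m '0').length : Nat) : Int) = k) := by
            rintro ⟨-, h⟩; apply hck; simpa using h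
          rw [if_neg this]
          have hcons : pvFlat (String.ofList ('0' :: List.replicate m '0') :: pvRunsB k (c :: cs))
              = ('0' :: List.replicate m '0') ++ pvFlat (pvRunsB k (c :: cs)) := by simp [pvFlat]
          rw [hcons, pvRunsB_flat_cons k c hc cs]
          simp [pvFlat_append, pvFlat_repl_zero, pvFlat, List.replicate_succ]

theorem pvJoin_nil_eq_flatten (l : List (List Char)) : PySem.Chars.join [] l = l.flatten := by
  unfold PySem.Chars.join
  induction l with
  | nil => rfl
  | cons x xs ih =>
    cases xs with
    | nil => simp [List.intercalate]
    | cons y ys =>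
      rw [List.flatten_cons, ← ih]
      simp [List.intercalate, List.intersperse]

theorem pvJoin_empty_eq (l : List String) : PySem.Str.join "" l = String.ofList (pvFlat l) := by
  unfold PySem.Str.join
  rw [show ("" : String).toList = [] from rfl, pvJoin_nil_eq_flatten]
  rfl

-- ===== VERDICT (by name: the statement is the Claim_ definition above) =====
theorem remove_k_zero_spec : Claim_equal_remove_k_zero := by
  intro str1 k _
  unfold Spec_remove_k_zero remove_k_zero remove_k_zero_alt
  by_cases h : str1 = "" ∨ k < 1
  · rw [if_pos h, if_pos h]
  · rw [if_neg h, if_neg h]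
    have hk : 1 ≤ k := by by_contra hk'; exact h (Or.inr (by omega))
    have hmain := pvLoop_spec k hk str1.toList [] 0
    simp only [List.replicate_zero, List.append_nil, List.nil_append, List.length_nil,
      Nat.cast_zero, Nat.zero_add, List.length_map, if_true] at hmain ⊢
    rw [hmain]
    rw [pvJoin_empty_eq, pvJoin_empty_eq]
    have h2 := pvRuns_flat k hk str1.toList 0 []
    simp only [List.replicate_zero, List.nil_append, pvFlat, List.map_nil, List.flatten_nil] at h2
    rw [show pvFlat = fun l => (l.map String.toList).flatten from rfl]
    simp only [h2]
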